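-- pv_equiv track=rewrite | github.com/higorsdds-bot/mini_cobol_full.py | main.py | parse
-- ===== SOURCE A (Python) =====
-- def parse(code):
--     sentences = []
--     buffer = ""
--
--     for raw in code.splitlines():
--         if len(raw) >= 7 and raw[6] == "*":
--             continue  # comentário
--
--         line = raw[7:72].rstrip() if len(raw) >= 7 else raw.rstrip()
--         if not line.strip():
--             continue
--
--         buffer += " " + line.strip()
--
--         if line.strip().endswith("."):
--             sentences.append(buffer.strip().upper())
--             buffer = ""
--
--     if buffer:
--         raise RuntimeError("Erro COBOL: sentença sem ponto final.")
--
--     return sentences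
-- ===== SOURCE B (Python) =====
-- def parse(code):
--     # Comprehension-based extraction of the significant source text of each line.
--     cleaned = [
--         s
--         for s in (
--             (raw[7:72] if len(raw) >= 7 else raw).strip()
--             for raw in code.splitlines()
--             if not (len(raw) >= 7 and raw[6] == "*")
--         )
--         if s
--     ]
--
--     def split(ls):
--         # Recursive descent: slice off the first '.'-terminated sentence, recurse on the rest.
--         for i, s in enumerate(ls):
--             if s.endswith("."):
--                 return [" ".join(ls[: i + 1]).upper()] + split(ls[i + 1 :])
--         if ls:
--             raise RuntimeError("Erro COBOL: sentença sem ponto final.")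
--         return []
--
--     return split(cleaned)
-- ===== Notes on version B (the rewrite author's own statement) =====
-- stated objective: alternative
-- what changed: A's single stateful loop folding lines into a growing string buffer is replaced by a comprehension extracting the cleaned lines and a recursive-descent splitter that finds the first '.'-terminated line, slices that sentence off with take/drop and ' '.join, and recurses on the remaining lines.
import Mathlib
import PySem

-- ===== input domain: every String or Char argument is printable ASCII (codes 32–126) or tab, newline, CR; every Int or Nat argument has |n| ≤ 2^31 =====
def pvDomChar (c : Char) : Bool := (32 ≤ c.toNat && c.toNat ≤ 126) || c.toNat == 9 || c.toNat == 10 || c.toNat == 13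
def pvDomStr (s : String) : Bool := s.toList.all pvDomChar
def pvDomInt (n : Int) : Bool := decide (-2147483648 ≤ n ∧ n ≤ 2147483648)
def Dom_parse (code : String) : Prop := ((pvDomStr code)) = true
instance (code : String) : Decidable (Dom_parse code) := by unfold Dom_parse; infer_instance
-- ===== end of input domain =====

-- B replaces A's single stateful loop with a comprehension extracting the cleaned lines
-- followed by a recursive-descent splitter that slices off the first '.'-terminated
-- sentence and recurses on the remaining lines (objective: alternative, same cost).
-- Where the Python programs raise RuntimeError (unterminated final sentence) both ports
-- return values outside the claim; Pre_parse excludes exactly those inputs.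

-- ===== PORT A =====
def parseStepA (st : List String × List Char) (raw : List Char) : List String × List Char :=
  if 7 ≤ raw.length ∧ PySem.List.pyGet? raw 6 = some '*' then st
  else
    let line := if 7 ≤ raw.length
      then PySem.Chars.rstrip (PySem.List.slice raw (some 7) (some 72))
      else PySem.Chars.rstrip raw
    if PySem.Chars.strip line = [] then st
    else
      let buffer := st.2 ++ ' ' :: PySem.Chars.strip line
      if PySem.Chars.endswith (PySem.Chars.strip line) ['.'] then
        (st.1 ++ [String.ofList (PySem.Chars.upper (PySem.Chars.strip buffer))], [])
      else (st.1, buffer)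

def parse (code : String) : List String :=
  let st := (PySem.Chars.splitlines code.toList).foldl parseStepA ([], [])
  -- Python raises RuntimeError here when the buffer is non-empty (excluded by Pre_parse);
  -- the port returns [] on that branch.
  if st.2 = [] then st.1 else []

-- ===== PORT B =====
-- Python's 'for i, s in enumerate(ls): if s.endswith("."): return …' is a first-index
-- search, ported as findIdx?; on the no-dot branch Python raises RuntimeError for a
-- non-empty ls (excluded by Pre_parse), the port returns [] there.
def splitB (ls : List (List Char)) : List String :=
  match h : ls.findIdx? (fun s => PySem.Chars.endswith s ['.']) with
  | some i =>
      String.ofList (PySem.Chars.upper (PySem.Chars.join [' '] (ls.take (i + 1))))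
        :: splitB (ls.drop (i + 1))
  | none => []
termination_by ls.length
decreasing_by
  have hne : ls ≠ [] := by
    intro hnil; rw [hnil] at h; simp at h
  have hpos : 0 < ls.length := List.length_pos_iff.mpr hne
  simp only [List.length_drop]
  omega

def parse_alt (code : String) : List String :=
  let cleaned :=
    (((PySem.Chars.splitlines code.toList).filter
        (fun raw => decide ¬(7 ≤ raw.length ∧ PySem.List.pyGet? raw 6 = some '*'))).map
      (fun raw => PySem.Chars.strip
        (if 7 ≤ raw.length then PySem.List.slice raw (some 7) (some 72) else raw))).filter
      (fun s => decide (s ≠ []))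
  splitB cleaned

-- ===== PRECONDITION & SPEC =====
-- what one physical line contributes: none for a comment / blank line, else its stripped text
def pvClean (raw : List Char) : Option (List Char) :=
  if 7 ≤ raw.length ∧ PySem.List.pyGet? raw 6 = some '*' then none
  else
    let s := PySem.Chars.strip (if 7 ≤ raw.length then PySem.List.slice raw (some 7) (some 72) else raw)
    if s = [] then none else some s

-- Pre_parse: the last cleaned (non-comment, non-blank) line, if any, ends with '.';
-- otherwise both Python programs raise RuntimeError ("Erro COBOL: sentença sem ponto final.").
def Pre_parse (code : String) : Prop :=
  (match ((PySem.Chars.splitlines code.toList).filterMap pvClean).getLast? with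
   | none => true
   | some s => PySem.Chars.endswith s ['.']) = true

instance (code : String) : Decidable (Pre_parse code) := by unfold Pre_parse; infer_instance

def pvWitness_parse : String := "       DISPLAY X.\n      * comment\n       MOVE A\n         TO B."

def Spec_parse (code : String) (out : List String) : Prop := out = parse_alt code
instance (code : String) (out : List String) : Decidable (Spec_parse code out) := by unfold Spec_parse; infer_instance

-- ===== CLAIM (what is proved, stated in full; the proofs are below) =====
def Claim_equal_parse : Prop := ∀ (code : String), Dom_parse code → Pre_parse code → Spec_parse code (parse code)

-- ===== LEMMAS AND PROOFS =====

-- the sentence string made from one group of cleaned lines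
def pvSent (grp : List (List Char)) : String :=
  String.ofList (PySem.Chars.upper (PySem.Chars.join [' '] grp))

-- proof-level grouping of the cleaned lines: groups ending at '.'-lines, plus the
-- trailing remainder with no '.'-line
def gstep (s : List Char) (p : List (List (List Char)) × List (List Char)) :
    List (List (List Char)) × List (List Char) :=
  if PySem.Chars.endswith s ['.'] then ([s] :: p.1, p.2)
  else match p.1 with
    | [] => ([], s :: p.2)
    | g0 :: gs => ((s :: g0) :: gs, p.2)

def gsplit (L : List (List Char)) : List (List (List Char)) × List (List Char) :=
  L.foldr gstep ([], [])

def mergeFirst (parts : List (List Char)) : List (List (List Char)) → List (List (List Char))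
  | [] => []
  | g0 :: gs => (parts ++ g0) :: gs

-- A's intermediate grouping loop (proof helper mirroring A's buffer at list granularity)
def groupStepB (st : List String × List (List Char)) (s : List Char) : List String × List (List Char) :=
  let parts := st.2 ++ [s]
  if PySem.Chars.endswith s ['.'] then
    (st.1 ++ [pvSent parts], [])
  else (st.1, parts)

-- A's buffer, as a function of the accumulated parts
def pvBuf (parts : List (List Char)) : List Char := (parts.map (fun p => ' ' :: p)).flatten

theorem pvBuf_append (q : List (List Char)) (s : List Char) :
    pvBuf (q ++ [s]) = pvBuf q ++ ' ' :: s := by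
  simp [pvBuf]

theorem rstrip_eq_self_of_last (y : List Char) (c : Char) (h : y.getLast? = some c)
    (hc : PySem.Chars.isspace c = false) : PySem.Chars.rstrip y = y := by
  have hrev : y.reverse.head? = some c := by simpa using h
  cases hy : y.reverse with
  | nil => rw [hy] at hrev; simp at hrev
  | cons a t =>
    rw [hy] at hrev
    simp at hrev
    subst hrev
    simp only [PySem.Chars.rstrip, hy]
    rw [List.dropWhile_cons_of_neg (by simp [hc])]
    rw [← hy]; simp

theorem rstrip_append_spaces (y b : List Char)
    (hb : ∀ c ∈ b, PySem.Chars.isspace c = true) :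
    PySem.Chars.rstrip (y ++ b) = PySem.Chars.rstrip y := by
  have hb' : b.reverse.dropWhile PySem.Chars.isspace = [] :=
    List.dropWhile_eq_nil_iff.mpr (by intro c hc; simpa using hb c (by simpa using hc))
  simp [PySem.Chars.rstrip, List.dropWhile_append, hb']

theorem rstrip_decomp (x : List Char) :
    ∃ b, x = PySem.Chars.rstrip x ++ b ∧ ∀ c ∈ b, PySem.Chars.isspace c = true := by
  refine ⟨(x.reverse.takeWhile PySem.Chars.isspace).reverse, ?_, ?_⟩
  · have := List.takeWhile_append_dropWhile (p := PySem.Chars.isspace) (l := x.reverse)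
    simp only [PySem.Chars.rstrip]
    rw [← List.reverse_append, this, List.reverse_reverse]
  · intro c hc
    exact List.mem_takeWhile_imp (by simpa using hc)

theorem rstrip_last (x : List Char) (h : PySem.Chars.rstrip x ≠ []) :
    ∃ c, (PySem.Chars.rstrip x).getLast? = some c ∧ PySem.Chars.isspace c = false := by
  simp only [PySem.Chars.rstrip] at *
  cases hd : x.reverse.dropWhile PySem.Chars.isspace with
  | nil => simp [hd] at h
  | cons a t =>
    refine ⟨a, ?_, ?_⟩
    · simp
    · have := List.head_dropWhile_not (p := PySem.Chars.isspace) (l := x.reverse)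
        (by simp [hd])
      simpa [hd] using this

theorem strip_rstrip (x : List Char) :
    PySem.Chars.strip (PySem.Chars.rstrip x) = PySem.Chars.strip x := by
  obtain ⟨b, hx, hb⟩ := rstrip_decomp x
  by_cases h0 : PySem.Chars.rstrip x = []
  · rw [h0]
    have hxb : x = b := by rw [hx, h0]; simp
    have : x.dropWhile PySem.Chars.isspace = [] :=
      List.dropWhile_eq_nil_iff.mpr (by intro c hc; simp [hb c (hxb ▸ hc)])
    simp [PySem.Chars.strip, PySem.Chars.lstrip, PySem.Chars.rstrip, this]
  · obtain ⟨c, hlast, hcs⟩ := rstrip_last x h0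
    have hmem : c ∈ PySem.Chars.rstrip x := List.mem_of_getLast? hlast
    have hne : (PySem.Chars.rstrip x).dropWhile PySem.Chars.isspace ≠ [] := by
      intro hnil
      have := List.dropWhile_eq_nil_iff.mp hnil c hmem
      simp [hcs] at this
    conv_rhs => rw [PySem.Chars.strip, PySem.Chars.lstrip, hx]
    rw [List.dropWhile_append]
    simp only [List.isEmpty_iff, hne, if_false]
    rw [rstrip_append_spaces _ b hb]
    rfl

theorem strip_idem (x : List Char) :
    PySem.Chars.strip (PySem.Chars.strip x) = PySem.Chars.strip x := by
  have h1 : PySem.Chars.strip x = PySem.Chars.rstrip (PySem.Chars.lstrip x) := rfl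
  rw [h1, strip_rstrip]
  show PySem.Chars.rstrip ((x.dropWhile _).dropWhile _) = _
  rw [List.dropWhile_idempotent]
  rfl

theorem strip_head (x : List Char) (h : PySem.Chars.strip x ≠ []) :
    ∃ c t, PySem.Chars.strip x = c :: t ∧ PySem.Chars.isspace c = false := by
  have h1 : PySem.Chars.strip x = PySem.Chars.rstrip (PySem.Chars.lstrip x) := rfl
  cases hs : PySem.Chars.strip x with
  | nil => exact absurd hs h
  | cons c t =>
    refine ⟨c, t, rfl, ?_⟩
    obtain ⟨b, hy, hb⟩ := rstrip_decomp (PySem.Chars.lstrip x)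
    rw [← h1, hs] at hy
    have hy' : List.dropWhile PySem.Chars.isspace x = c :: (t ++ b) := by
      simpa [PySem.Chars.lstrip] using hy
    have hne : List.dropWhile PySem.Chars.isspace x ≠ [] := by rw [hy']; simp
    have hhd := List.head_dropWhile_not (p := PySem.Chars.isspace) (l := x) hne
    simp only [hy'] at hhd
    simpa using hhd

theorem strip_last (x : List Char) (h : PySem.Chars.strip x ≠ []) :
    ∃ c, (PySem.Chars.strip x).getLast? = some c ∧ PySem.Chars.isspace c = false :=
  rstrip_last (PySem.Chars.lstrip x) h

theorem join_getLast (q : List (List Char)) (p : List Char) (c : Char)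
    (hq : q.getLast? = some p) (hp : p.getLast? = some c) :
    (PySem.Chars.join [' '] q).getLast? = some c := by
  induction q with
  | nil => simp at hq
  | cons a t ih =>
    cases t with
    | nil =>
      simp at hq
      subst hq
      rw [PySem.Chars.join_singleton]
      exact hp
    | cons b r =>
      rw [PySem.Chars.join_cons_cons]
      have hq' : (b :: r).getLast? = some p := by
        rw [← hq]; exact (List.getLast?_cons_cons ..).symm
      have hj := ih hq'
      rw [List.getLast?_append_of_ne_nil]
      · exact hj
      · intro hnil; rw [hnil] at hj; simp at hj

theorem pvBuf_eq_join (q : List (List Char)) (hq : q ≠ []) :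
    pvBuf q = ' ' :: PySem.Chars.join [' '] q := by
  induction q with
  | nil => simp at hq
  | cons a t ih =>
    cases t with
    | nil => simp [pvBuf, PySem.Chars.join_singleton]
    | cons b r =>
      rw [PySem.Chars.join_cons_cons]
      have := ih (by simp)
      simp only [pvBuf] at this ⊢
      have h2 : ' ' :: (b ++ (List.map (fun p => ' ' :: p) r).flatten) =
          ' ' :: PySem.Chars.join [' '] (b :: r) := by simpa using this
      simp only [List.cons.injEq, true_and] at h2
      simp [h2]

theorem strip_buf (q : List (List Char)) (hq : q ≠ [])
    (h : ∀ p ∈ q, p ≠ [] ∧ PySem.Chars.strip p = p) :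
    PySem.Chars.strip (pvBuf q) = PySem.Chars.join [' '] q := by
  rw [pvBuf_eq_join q hq]
  obtain ⟨p₀, t, rfl⟩ : ∃ p₀ t, q = p₀ :: t := by
    cases q with | nil => simp at hq | cons a t => exact ⟨a, t, rfl⟩
  obtain ⟨hp₀ne, hp₀s⟩ := h p₀ (by simp)
  obtain ⟨c₀, t₀, hc₀, hc₀s⟩ := strip_head p₀ (by rw [hp₀s]; exact hp₀ne)
  rw [hp₀s] at hc₀
  obtain ⟨pl, hpl⟩ : ∃ pl, (p₀ :: t).getLast? = some pl :=
    ⟨(p₀ :: t).getLast (by simp), List.getLast?_eq_some_getLast _⟩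
  obtain ⟨hplne, hpls⟩ := h pl (List.mem_of_getLast? hpl)
  obtain ⟨cl, hcl, hcls⟩ := strip_last pl (by rw [hpls]; exact hplne)
  rw [hpls] at hcl
  have hjl : (PySem.Chars.join [' '] (p₀ :: t)).getLast? = some cl := join_getLast _ _ _ hpl hcl
  have hjh : ∃ r, PySem.Chars.join [' '] (p₀ :: t) = p₀ ++ r := by
    cases t with
    | nil => exact ⟨[], by rw [PySem.Chars.join_singleton]; simp⟩
    | cons b rr => exact ⟨_, by rw [PySem.Chars.join_cons_cons, List.append_assoc]⟩
  obtain ⟨r, hr⟩ := hjh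
  show PySem.Chars.rstrip (List.dropWhile PySem.Chars.isspace (' ' :: _)) = _
  rw [List.dropWhile_cons_of_pos (by simp [PySem.Chars.isspace])]
  have hdw : List.dropWhile PySem.Chars.isspace (PySem.Chars.join [' '] (p₀ :: t)) =
      PySem.Chars.join [' '] (p₀ :: t) := by
    rw [hr, hc₀]
    simp only [List.cons_append]
    rw [List.dropWhile_cons_of_neg (by simp [hc₀s])]
  rw [hdw]
  exact rstrip_eq_self_of_last _ cl hjl hcls

-- B's cleaned pipeline computes exactly the filterMap of pvClean
theorem cleaned_eq (raws : List (List Char)) :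
    ((raws.filter (fun raw => decide ¬(7 ≤ raw.length ∧ PySem.List.pyGet? raw 6 = some '*'))).map
        (fun raw => PySem.Chars.strip
          (if 7 ≤ raw.length then PySem.List.slice raw (some 7) (some 72) else raw))).filter
        (fun s => decide (s ≠ [])) = raws.filterMap pvClean := by
  induction raws with
  | nil => rfl
  | cons raw t ih =>
    rw [List.filter_cons, List.filterMap_cons]
    by_cases h1 : 7 ≤ raw.length ∧ PySem.List.pyGet? raw 6 = some '*'
    · have e1 : (decide ¬(7 ≤ raw.length ∧ PySem.List.pyGet? raw 6 = some '*')) = false := by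
        simp [h1]
      have e2 : pvClean raw = none := by simp [pvClean, h1]
      rw [e1, if_neg (by simp), e2]
      simpa using ih
    · have e1 : (decide ¬(7 ≤ raw.length ∧ PySem.List.pyGet? raw 6 = some '*')) = true := by
        simp [h1]
      have e2 : pvClean raw = if PySem.Chars.strip
          (if 7 ≤ raw.length then PySem.List.slice raw (some 7) (some 72) else raw) = []
          then none else some (PySem.Chars.strip
            (if 7 ≤ raw.length then PySem.List.slice raw (some 7) (some 72) else raw)) := by
        simp only [pvClean, if_neg h1]
      rw [e1, e2, if_pos rfl, List.map_cons, List.filter_cons]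
      by_cases h2 : PySem.Chars.strip
          (if 7 ≤ raw.length then PySem.List.slice raw (some 7) (some 72) else raw) = []
      · simp [h2]
        simpa using ih
      · simp [h2]
        simpa using ih

-- mainFold (reused): A's raw-line fold equals the grouping fold over the cleaned lines
theorem mainFold (raws : List (List Char)) : ∀ sens parts,
    (∀ p ∈ parts, p ≠ [] ∧ PySem.Chars.strip p = p) →
    raws.foldl parseStepA (sens, pvBuf parts) =
      (((raws.filterMap pvClean).foldl groupStepB (sens, parts)).1,
       pvBuf ((raws.filterMap pvClean).foldl groupStepB (sens, parts)).2) := by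
  induction raws with
  | nil => intro sens parts _; rfl
  | cons raw t ih =>
    intro sens parts hinv
    by_cases hcom : 7 ≤ raw.length ∧ PySem.List.pyGet? raw 6 = some '*'
    · have hpc : pvClean raw = none := by simp [pvClean, hcom]
      rw [List.foldl_cons, List.filterMap_cons, hpc]
      have hstep : parseStepA (sens, pvBuf parts) raw = (sens, pvBuf parts) := by
        simp [parseStepA, hcom]
      rw [hstep]
      exact ih sens parts hinv
    · have hline : (if 7 ≤ raw.length
          then PySem.Chars.rstrip (PySem.List.slice raw (some 7) (some 72))
          else PySem.Chars.rstrip raw) =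
          PySem.Chars.rstrip (if 7 ≤ raw.length
            then PySem.List.slice raw (some 7) (some 72) else raw) := by
        split <;> rfl
      have hs_eq : PySem.Chars.strip (PySem.Chars.rstrip (if 7 ≤ raw.length
            then PySem.List.slice raw (some 7) (some 72) else raw)) =
          PySem.Chars.strip (if 7 ≤ raw.length
            then PySem.List.slice raw (some 7) (some 72) else raw) :=
        strip_rstrip _
      set s := PySem.Chars.strip (if 7 ≤ raw.length
            then PySem.List.slice raw (some 7) (some 72) else raw) with hs_def
      have hpc : pvClean raw = if s = [] then none else some s := by
        simp only [pvClean, if_neg hcom, ← hs_def]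
      have hstepA : parseStepA (sens, pvBuf parts) raw =
          if s = [] then (sens, pvBuf parts)
          else if PySem.Chars.endswith s ['.'] then
            (sens ++ [String.ofList (PySem.Chars.upper
              (PySem.Chars.strip (pvBuf parts ++ ' ' :: s)))], [])
          else (sens, pvBuf parts ++ ' ' :: s) := by
        simp only [parseStepA, if_neg hcom, hline, hs_eq]
      by_cases hs : s = []
      · rw [List.foldl_cons, List.filterMap_cons, hpc, if_pos hs, hstepA, if_pos hs]
        exact ih sens parts hinv
      · have hsclean : s ≠ [] ∧ PySem.Chars.strip s = s := ⟨hs, by rw [hs_def]; exact strip_idem _⟩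
        have hinv' : ∀ p ∈ parts ++ [s], p ≠ [] ∧ PySem.Chars.strip p = p := by
          intro p hp
          rcases List.mem_append.mp hp with h | h
          · exact hinv p h
          · simp at h; subst h; exact hsclean
        rw [List.foldl_cons, List.filterMap_cons, hpc, if_neg hs, hstepA, if_neg hs,
          List.foldl_cons]
        by_cases hdot : PySem.Chars.endswith s ['.'] = true
        · have hgs : groupStepB (sens, parts) s =
              (sens ++ [String.ofList (PySem.Chars.upper
                (PySem.Chars.join [' '] (parts ++ [s])))], []) := by
            simp [groupStepB, pvSent, hdot]
          have hstrip : PySem.Chars.strip (pvBuf parts ++ ' ' :: s) =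
              PySem.Chars.join [' '] (parts ++ [s]) := by
            rw [← pvBuf_append]
            exact strip_buf _ (by simp) hinv'
          rw [if_pos hdot, hgs, hstrip]
          have := ih (sens ++ [String.ofList (PySem.Chars.upper
            (PySem.Chars.join [' '] (parts ++ [s])))]) [] (by simp)
          simpa [pvBuf] using this
        · have hgs : groupStepB (sens, parts) s = (sens, parts ++ [s]) := by
            simp [groupStepB, hdot]
          rw [if_neg hdot, hgs, ← pvBuf_append]
          exact ih sens (parts ++ [s]) hinv'

theorem gsplit_cons (s : List Char) (t : List (List Char)) :
    gsplit (s :: t) = gstep s (gsplit t) := rfl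

-- the grouping fold, expressed through gsplit
theorem groupFold (L : List (List Char)) : ∀ sens parts,
    L.foldl groupStepB (sens, parts) =
      (sens ++ (mergeFirst parts (gsplit L).1).map pvSent,
       if (gsplit L).1 = [] then parts ++ (gsplit L).2 else (gsplit L).2) := by
  induction L with
  | nil => intro sens parts; simp [gsplit, mergeFirst]
  | cons s t ih =>
    intro sens parts
    rw [gsplit_cons]
    by_cases hdot : PySem.Chars.endswith s ['.'] = true
    · have hstep : groupStepB (sens, parts) s = (sens ++ [pvSent (parts ++ [s])], []) := by
        simp [groupStepB, hdot]
      rw [List.foldl_cons, hstep, ih]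
      rcases hg : (gsplit t).1 with _ | ⟨g0, gs⟩ <;>
        simp [gstep, hdot, hg, mergeFirst]
    · have hstep : groupStepB (sens, parts) s = (sens, parts ++ [s]) := by
        simp [groupStepB, hdot]
      rw [List.foldl_cons, hstep, ih]
      rcases hg : (gsplit t).1 with _ | ⟨g0, gs⟩ <;>
        simp [gstep, hdot, hg, mergeFirst]

theorem gsplit_no_dot (t : List (List Char))
    (h : ∀ s ∈ t, PySem.Chars.endswith s ['.'] = false) : gsplit t = ([], t) := by
  induction t with
  | nil => rfl
  | cons s r ih =>
    have hr := ih (fun x hx => h x (List.mem_cons_of_mem _ hx))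
    rw [gsplit_cons, hr]
    simp [gstep, h s (List.mem_cons_self)]

theorem gsplit_cons_ne_nil (s : List Char) (t : List (List Char)) :
    gsplit (s :: t) ≠ ([], []) := by
  rw [gsplit_cons]
  by_cases hdot : PySem.Chars.endswith s ['.'] = true
  · simp [gstep, hdot]
  · rcases hg : (gsplit t).1 with _ | ⟨g0, gs⟩ <;> simp [gstep, hdot, hg]

theorem gsplit_first_dot (L : List (List Char)) : ∀ i,
    L.findIdx? (fun s => PySem.Chars.endswith s ['.']) = some i →
    gsplit L = ((L.take (i + 1)) :: (gsplit (L.drop (i + 1))).1, (gsplit (L.drop (i + 1))).2) := by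
  induction L with
  | nil => intro i h; simp at h
  | cons s t ih =>
    intro i h
    rw [List.findIdx?_cons] at h
    by_cases hdot : PySem.Chars.endswith s ['.'] = true
    · rw [if_pos hdot] at h
      simp at h
      subst h
      rw [gsplit_cons]
      simp [gstep, hdot]
    · rw [if_neg hdot] at h
      rcases hj : t.findIdx? (fun s => PySem.Chars.endswith s ['.']) with _ | j
      · rw [hj] at h; simp at h
      · rw [hj] at h
        simp at h
        subst h
        have ht := ih j hj
        rw [gsplit_cons, ht]
        simp [gstep, hdot]

theorem splitB_eq (ls : List (List Char)) : splitB ls = ((gsplit ls).1).map pvSent := by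
  induction ls using splitB.induct with
  | case1 ls i h ih =>
    rw [splitB, h, gsplit_first_dot ls i h]
    simp [pvSent, ih]
  | case2 ls h =>
    rw [splitB, h]
    have := gsplit_no_dot ls (List.findIdx?_eq_none_iff.mp h)
    simp [this]

theorem mergeFirst_nil (g : List (List (List Char))) :
    (mergeFirst [] g).map pvSent = g.map pvSent := by
  cases g <;> simp [mergeFirst]

theorem gsplit_rest_nil (L : List (List Char))
    (h : (match L.getLast? with
          | none => true
          | some s => PySem.Chars.endswith s ['.']) = true) :
    (gsplit L).2 = [] := by
  induction L with
  | nil => rfl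
  | cons s t ih =>
    cases ht : t with
    | nil =>
      subst ht
      simp only [List.getLast?_singleton] at h
      rw [gsplit_cons]
      simp [gstep, gsplit, h]
    | cons b r =>
      have hlast : (s :: t).getLast? = t.getLast? := by
        rw [ht]; exact List.getLast?_cons_cons ..
      have ht2 := ih (by rw [← hlast]; exact h)
      have htne : t ≠ [] := by rw [ht]; simp
      rw [← ht]
      rw [gsplit_cons]
      by_cases hdot : PySem.Chars.endswith s ['.'] = true
      · simp [gstep, hdot, ht2]
      · rcases hg : (gsplit t).1 with _ | ⟨g0, gs⟩
        · exfalso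
          rcases t with _ | ⟨x, y⟩
          · exact htne rfl
          · exact gsplit_cons_ne_nil x y (Prod.ext hg ht2)
        · simp [gstep, hdot, hg, ht2]

-- ===== VERDICT (by name: the statement is the Claim_ definition above) =====
theorem parse_spec : Claim_equal_parse := by
  intro code _dom hpre
  unfold Spec_parse parse parse_alt
  have hmain := mainFold (PySem.Chars.splitlines code.toList) [] [] (by simp)
  have h0 : pvBuf ([] : List (List Char)) = [] := rfl
  rw [h0] at hmain
  rw [hmain]
  set cleaned := (PySem.Chars.splitlines code.toList).filterMap pvClean with hcl
  have hrest : (gsplit cleaned).2 = [] := gsplit_rest_nil cleaned (by exact hpre)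
  have hG := groupFold cleaned [] []
  rw [hG]
  simp only [cleaned_eq, ← hcl, splitB_eq, hrest]
  by_cases hg : (gsplit cleaned).1 = []
  · simp [hg, mergeFirst, pvBuf]
  · simp [hg, mergeFirst_nil, pvBuf]
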